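-- pv_equiv track=rewrite | github.com/miliar/Code_Jam_Webscraper | solutions_python/solutions_year11_round0_nr3/413.py | minim
-- ===== SOURCE A (Python) =====
-- def minim(candylist,num):
-- 	minim=int(candylist.pop(0))
-- 	result=int(minim)
-- 	for move in range(int(num)-1):
-- 		elem=candylist.pop(0)
-- 		result=result+int(elem)
-- 		if int(elem)<int(minim):
-- 			minim=elem
-- 	result=result-int(minim)
-- 	return result
-- ===== SOURCE B (Python) =====
-- def minim(candylist, num):
--     vals = [int(candylist.pop(0))]
--     for _ in range(int(num) - 1):
--         vals.append(int(candylist.pop(0)))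
--     return sum(vals) - min(vals)
-- ===== Notes on version B (the rewrite author's own statement) =====
-- stated objective: simpler
-- what changed: A's single-pass accumulator (running sum plus tracked minimum with a branch) is replaced by collecting the popped ints into a list and returning sum(vals) - min(vals), with the identical pop pattern (one initial pop, then num-1 more).
import Mathlib
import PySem

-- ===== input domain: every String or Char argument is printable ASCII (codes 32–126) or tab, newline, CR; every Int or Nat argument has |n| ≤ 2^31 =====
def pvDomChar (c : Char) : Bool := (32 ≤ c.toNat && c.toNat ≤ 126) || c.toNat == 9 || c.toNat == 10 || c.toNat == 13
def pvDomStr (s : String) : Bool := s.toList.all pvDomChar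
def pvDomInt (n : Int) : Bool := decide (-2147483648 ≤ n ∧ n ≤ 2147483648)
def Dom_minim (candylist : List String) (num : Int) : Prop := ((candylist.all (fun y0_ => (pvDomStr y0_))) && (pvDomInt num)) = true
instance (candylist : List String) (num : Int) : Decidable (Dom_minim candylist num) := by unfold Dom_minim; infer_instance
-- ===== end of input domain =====

-- B collects the popped ints into a list and returns sum - min instead of A's running sum + tracked minimum; same pops, same result.
-- Both Pythons mutate candylist by the same pops; the equivalence proved here is about the return value.

-- ===== PORT A =====
-- one loop iteration of A: pop, add, update tracked minimum (the loop variable is unused)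
def minimStep (st : List String × Int × Int) (_ : Int) : List String × Int × Int :=
  let elem := st.1.headD ""
  let e := (PySem.Int.ofStr? elem).getD 0
  (st.1.tail, st.2.1 + e, if e < st.2.2 then e else st.2.2)

def minim (candylist : List String) (num : Int) : Int :=
  let m0 := (PySem.Int.ofStr? (candylist.headD "")).getD 0
  let st := (PySem.List.pyRange 0 (num - 1) 1).foldl minimStep (candylist.tail, m0, m0)
  st.2.1 - st.2.2

-- ===== PORT B =====
def minim_alt (candylist : List String) (num : Int) : Int :=
  let v0 := (PySem.Int.ofStr? (candylist.headD "")).getD 0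
  let vals := v0 :: ((candylist.tail.take (num - 1).toNat).map (fun s => (PySem.Int.ofStr? s).getD 0))
  vals.sum - ((PySem.List.min? vals (fun y => y)).getD 0)

-- ===== PRECONDITION & SPEC =====
-- A pops and int()-parses the first max(1, num) strings: Pre_ requires that many elements, all parseable (else IndexError/ValueError).
def Pre_minim (candylist : List String) (num : Int) : Prop :=
  max 1 num ≤ (candylist.length : Int) ∧
  ∀ s ∈ candylist.take (max 1 num).toNat, (PySem.Int.ofStr? s).isSome = true
instance (candylist : List String) (num : Int) : Decidable (Pre_minim candylist num) := by unfold Pre_minim; infer_instance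
def pvWitness_minim : List String × Int := (["3", "1", "2"], 3)

def Spec_minim (candylist : List String) (num : Int) (out : Int) : Prop := out = minim_alt candylist num
instance (candylist : List String) (num : Int) (out : Int) : Decidable (Spec_minim candylist num out) := by unfold Spec_minim; infer_instance

-- ===== CLAIM (what is proved, stated in full; the proofs are below) =====
def Claim_equal_minim : Prop := ∀ (candylist : List String) (num : Int), Dom_minim candylist num → Pre_minim candylist num → Spec_minim candylist num (minim candylist num)

-- ===== LEMMAS AND PROOFS =====

-- A's loop ignores the loop variable, so the foldl is an iterate of its step.
theorem foldl_ignore {α β : Type} (f : β → β) (l : List α) (init : β) :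
    l.foldl (fun st _ => f st) init = f^[l.length] init := by
  induction l generalizing init with
  | nil => rfl
  | cons a t ih => simp [List.foldl_cons, Function.iterate_succ_apply, ih]

-- characterisation of n iterations of A's step
theorem minimStep_iterate (n : Nat) (rest : List String) (res m : Int)
    (h : n ≤ rest.length) :
    (fun st => minimStep st 0)^[n] (rest, res, m) =
      (rest.drop n,
       res + (((rest.take n).map (fun s => (PySem.Int.ofStr? s).getD 0)).sum),
       ((rest.take n).map (fun s => (PySem.Int.ofStr? s).getD 0)).foldl
         (fun m e => if e < m then e else m) m) := by
  induction n generalizing rest res m with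
  | zero => simp
  | succ k ih =>
    cases rest with
    | nil => simp at h
    | cons a t =>
      simp only [List.length_cons, Nat.succ_le_succ_iff] at h
      rw [Function.iterate_succ_apply]
      rw [show minimStep ((a :: t : List String), res, m) 0 =
            (t, res + (PySem.Int.ofStr? a).getD 0,
             if (PySem.Int.ofStr? a).getD 0 < m then (PySem.Int.ofStr? a).getD 0 else m) from rfl]
      rw [ih _ _ _ h]
      simp [List.take_succ_cons, List.foldl_cons, add_assoc]

theorem minim_spec' (candylist : List String) (num : Int)
    (hpre : Pre_minim candylist num) :
    minim candylist num = minim_alt candylist num := by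
  obtain ⟨hlen, -⟩ := hpre
  cases candylist with
  | nil => simp at hlen
  | cons c0 rest =>
    simp only [minim, minim_alt, List.headD_cons, List.tail_cons]
    have hstep : minimStep = fun st (_ : Int) => minimStep st 0 := by
      funext st x; rfl
    rw [hstep, foldl_ignore, PySem.List.length_pyRange_one]
    have hn : (num - 1 - 0).toNat ≤ rest.length := by
      simp only [List.length_cons] at hlen; omega
    rw [minimStep_iterate _ _ _ _ hn]
    rw [PySem.List.min?_id_cons]
    simp only [Int.sub_zero, List.sum_cons, Option.getD_some]
    have hfold : ∀ (ys : List Int) (m : Int),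
        ys.foldl (fun m e => if e < m then e else m) m = ys.foldl min m := by
      intro ys
      induction ys with
      | nil => intro m; rfl
      | cons y t ih =>
        intro m
        simp only [List.foldl_cons, ih]
        congr 1
        simp only [min_def]; split_ifs <;> omega
    rw [hfold]

-- ===== VERDICT (by name: the statement is the Claim_ definition above) =====
theorem minim_spec : Claim_equal_minim := by
  intro candylist num _ hpre
  exact minim_spec' candylist num hpre
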